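-- pv_equiv track=rewrite | github.com/danielmisrael/caltech-ee148-spring2020-hw02 | run_predictions.py | remove_similar_locations
-- ===== SOURCE A (Python) =====
-- def remove_similar_locations(locations, confidences):
--     min_dist = 75
--     centroids = [locations[0]]
--     conf = [confidences[0]]
--     for loc, confidence in zip(locations, confidences):
--         is_new_centroid = True
--         for c in centroids:
--             if abs(loc[0] - c[0]) + abs(loc[1] - c[1]) < min_dist:
--                 is_new_centroid = False
--         if is_new_centroid:
--             centroids.append(loc)
--             conf.append(confidence)
--     return centroids, conf
-- ===== SOURCE B (Python) =====
-- def remove_similar_locations(locations, confidences):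
--     # Spatial-hash variant (alternative algorithm): buckets of cell size min_dist; a candidate is compared
--     # only against centroids stored in the 3x3 block of neighbouring cells.
--     min_dist = 75
--
--     def near(grid, p):
--         gx, gy = p[0] // min_dist, p[1] // min_dist
--         hit = False
--         for dx in (-1, 0, 1):
--             for dy in (-1, 0, 1):
--                 for q in grid.get((gx + dx, gy + dy), []):
--                     if abs(p[0] - q[0]) + abs(p[1] - q[1]) < min_dist:
--                         hit = True
--         return hit
--
--     first = locations[0]
--     grid = {(first[0] // min_dist, first[1] // min_dist): [first]}
--     kept_locs, kept_confs = [first], [confidences[0]]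
--     for loc, confidence in zip(locations, confidences):
--         if not near(grid, loc):
--             kept_locs.append(loc)
--             kept_confs.append(confidence)
--             grid.setdefault((loc[0] // min_dist, loc[1] // min_dist), []).append(loc)
--     return kept_locs, kept_confs
-- ===== Notes on version B (the rewrite author's own statement) =====
-- stated objective: alternative
-- what changed: Replaces A's inner linear scan over all accepted centroids with a spatial hash grid of cell size min_dist, so each candidate is compared only against centroids stored in the 3x3 block of neighbouring cells.
import Mathlib
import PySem

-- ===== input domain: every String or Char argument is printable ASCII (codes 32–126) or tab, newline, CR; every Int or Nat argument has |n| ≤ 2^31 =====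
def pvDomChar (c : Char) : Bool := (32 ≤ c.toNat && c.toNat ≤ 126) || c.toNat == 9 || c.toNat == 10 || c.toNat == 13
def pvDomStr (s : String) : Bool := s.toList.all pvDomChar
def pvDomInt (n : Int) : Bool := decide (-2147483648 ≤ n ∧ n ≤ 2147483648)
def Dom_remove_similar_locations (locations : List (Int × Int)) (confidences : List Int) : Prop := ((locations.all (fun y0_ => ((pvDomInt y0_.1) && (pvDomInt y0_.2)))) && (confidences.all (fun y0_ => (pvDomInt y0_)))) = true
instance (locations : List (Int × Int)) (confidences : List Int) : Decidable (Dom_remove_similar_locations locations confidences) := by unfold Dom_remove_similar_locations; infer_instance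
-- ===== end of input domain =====

-- B replaces A's inner scan over all accepted centroids by a spatial hash grid with
-- cell size min_dist: only the 3x3 block of neighbouring cells is inspected (an
-- alternative algorithm; same return value, proved below).

-- ===== PORT A =====
def remove_similar_locations (locations : List (Int × Int)) (confidences : List Int) : (List (Int × Int)) × List Int :=
  match locations, confidences with
  | loc0 :: _, conf0 :: _ =>
    (List.zip locations confidences).foldl
      (fun st lc =>
        let is_new := st.1.foldl
          (fun b c => if |lc.1.1 - c.1| + |lc.1.2 - c.2| < 75 then false else b) true
        if is_new then (st.1 ++ [lc.1], st.2 ++ [lc.2]) else st)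
      ([loc0], [conf0])
  | _, _ => ([], [])   -- Python raises IndexError here (excluded by Pre_)

-- ===== PORT B =====
def pvNear (grid : PySem.Dict (Int × Int) (List (Int × Int))) (p : Int × Int) : Bool :=
  let gx := PySem.Int.floordiv p.1 75
  let gy := PySem.Int.floordiv p.2 75
  [(-1 : Int), 0, 1].foldl (fun b dx =>
    [(-1 : Int), 0, 1].foldl (fun b2 dy =>
      (grid.getD (gx + dx, gy + dy) []).foldl
        (fun b3 q => if |p.1 - q.1| + |p.2 - q.2| < 75 then true else b3) b2) b) false

def pvBStep (st : ((List (Int × Int)) × List Int) × PySem.Dict (Int × Int) (List (Int × Int)))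
    (lc : (Int × Int) × Int) : ((List (Int × Int)) × List Int) × PySem.Dict (Int × Int) (List (Int × Int)) :=
  if pvNear st.2 lc.1 then st
  else ((st.1.1 ++ [lc.1], st.1.2 ++ [lc.2]),
        st.2.modify (PySem.Int.floordiv lc.1.1 75, PySem.Int.floordiv lc.1.2 75) [] (fun v => v ++ [lc.1]))

def remove_similar_locations_alt (locations : List (Int × Int)) (confidences : List Int) : (List (Int × Int)) × List Int :=
  match locations with
  | [] => ([], [])   -- Python raises IndexError here (excluded by Pre_)
  | first :: _ =>
    match confidences with
    | [] => ([], [])   -- Python raises IndexError here (excluded by Pre_)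
    | conf0 :: _ =>
      ((List.zip locations confidences).foldl pvBStep
        (([first], [conf0]),
          PySem.Dict.empty.insert (PySem.Int.floordiv first.1 75, PySem.Int.floordiv first.2 75) [first])).1

-- ===== PRECONDITION & SPEC =====
-- Pre_ excludes exactly the inputs where A raises IndexError: locations[0] / confidences[0] on an empty list.
def Pre_remove_similar_locations (locations : List (Int × Int)) (confidences : List Int) : Prop :=
  locations ≠ [] ∧ confidences ≠ []
instance (locations : List (Int × Int)) (confidences : List Int) : Decidable (Pre_remove_similar_locations locations confidences) := by unfold Pre_remove_similar_locations; infer_instance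

def pvWitness_remove_similar_locations : (List (Int × Int)) × List Int := ([(0, 0), (100, 0)], [3, 5])

def Spec_remove_similar_locations (locations : List (Int × Int)) (confidences : List Int) (out : (List (Int × Int)) × List Int) : Prop := out = remove_similar_locations_alt locations confidences
instance (locations : List (Int × Int)) (confidences : List Int) (out : (List (Int × Int)) × List Int) : Decidable (Spec_remove_similar_locations locations confidences out) := by unfold Spec_remove_similar_locations; infer_instance

-- ===== CLAIM (what is proved, stated in full; the proofs are below) =====
def Claim_equal_remove_similar_locations : Prop := ∀ (locations : List (Int × Int)) (confidences : List Int), Dom_remove_similar_locations locations confidences → Pre_remove_similar_locations locations confidences → Spec_remove_similar_locations locations confidences (remove_similar_locations locations confidences)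

-- ===== LEMMAS AND PROOFS =====

-- A's accepted-centroid step, named so the main induction can speak about it
-- (definitionally equal to the lambda inside the port of A).
def pvAStep (st : (List (Int × Int)) × List Int) (lc : (Int × Int) × Int) : (List (Int × Int)) × List Int :=
  let is_new := st.1.foldl
    (fun b c => if |lc.1.1 - c.1| + |lc.1.2 - c.2| < 75 then false else b) true
  if is_new then (st.1 ++ [lc.1], st.2 ++ [lc.2]) else st

def pvCell (p : Int × Int) : Int × Int := (PySem.Int.floordiv p.1 75, PySem.Int.floordiv p.2 75)

-- the grid invariant: every stored point is in its own cell's bucket, and the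
-- buckets hold exactly the accepted centroids
def pvInv (cents : List (Int × Int)) (g : PySem.Dict (Int × Int) (List (Int × Int))) : Prop :=
  (∀ k p, p ∈ g.getD k [] → pvCell p = k) ∧
  (∀ p, p ∈ cents ↔ p ∈ g.getD (pvCell p) [])

theorem pvfold_false {α : Type} (p : α → Prop) [DecidablePred p] (xs : List α) (b : Bool) :
    xs.foldl (fun b c => if p c then false else b) b = (b && !xs.any (fun c => decide (p c))) := by
  induction xs generalizing b with
  | nil => simp
  | cons x xs ih =>
    rw [List.foldl_cons, ih]
    by_cases h : p x <;> simp [h]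

theorem pvfold_true {α : Type} (p : α → Prop) [DecidablePred p] (xs : List α) (b : Bool) :
    xs.foldl (fun b c => if p c then true else b) b = (b || xs.any (fun c => decide (p c))) := by
  induction xs generalizing b with
  | nil => simp
  | cons x xs ih =>
    rw [List.foldl_cons, ih]
    by_cases h : p x <;> simp [h]

theorem pvcell_near (x y : Int) (h : |x - y| < 75) :
    PySem.Int.floordiv y 75 - PySem.Int.floordiv x 75 = -1 ∨
    PySem.Int.floordiv y 75 - PySem.Int.floordiv x 75 = 0 ∨
    PySem.Int.floordiv y 75 - PySem.Int.floordiv x 75 = 1 := by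
  have hx := PySem.Int.floordiv_mul_add_mod x 75
  have hy := PySem.Int.floordiv_mul_add_mod y 75
  have hx1 := PySem.Int.mod_nonneg x (b := 75) (by norm_num)
  have hx2 := PySem.Int.mod_lt x (b := 75) (by norm_num)
  have hy1 := PySem.Int.mod_nonneg y (b := 75) (by norm_num)
  have hy2 := PySem.Int.mod_lt y (b := 75) (by norm_num)
  have habs := abs_lt.mp h
  omega

theorem pvFound_eq (loc : Int × Int) (cents : List (Int × Int))
    (g : PySem.Dict (Int × Int) (List (Int × Int))) (hinv : pvInv cents g) :
    pvNear g loc = cents.any (fun c => decide (|loc.1 - c.1| + |loc.2 - c.2| < 75)) := by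
  simp only [pvNear, List.foldl_cons, List.foldl_nil,
    pvfold_true (fun c : Int × Int => |loc.1 - c.1| + |loc.2 - c.2| < 75)]
  rw [Bool.eq_iff_iff]
  simp only [Bool.or_eq_true, Bool.false_or, List.any_eq_true, decide_eq_true_eq]
  constructor
  · rintro ((((((((⟨c, hc, hp⟩ | ⟨c, hc, hp⟩) | ⟨c, hc, hp⟩) | ⟨c, hc, hp⟩) | ⟨c, hc, hp⟩) |
      ⟨c, hc, hp⟩) | ⟨c, hc, hp⟩) | ⟨c, hc, hp⟩) | ⟨c, hc, hp⟩) <;>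
      exact ⟨c, (hinv.2 c).mpr (by rw [hinv.1 _ c hc]; exact hc), hp⟩
  · rintro ⟨c, hcent, hp⟩
    have hc : c ∈ g.getD (pvCell c) [] := (hinv.2 c).mp hcent
    have h1 := pvcell_near loc.1 c.1 (by have := abs_nonneg (loc.2 - c.2); linarith)
    have h2 := pvcell_near loc.2 c.2 (by have := abs_nonneg (loc.1 - c.1); linarith)
    simp only [pvCell] at hc
    have hk : (PySem.Int.floordiv c.1 75, PySem.Int.floordiv c.2 75)
        = (PySem.Int.floordiv loc.1 75 + (PySem.Int.floordiv c.1 75 - PySem.Int.floordiv loc.1 75),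
           PySem.Int.floordiv loc.2 75 + (PySem.Int.floordiv c.2 75 - PySem.Int.floordiv loc.2 75)) := by
      rw [Prod.mk.injEq]; constructor <;> ring
    rw [hk] at hc
    rcases h1 with e1 | e1 | e1 <;> rcases h2 with e2 | e2 | e2 <;> rw [e1, e2] at hc <;>
      first
      | exact Or.inl (Or.inl (Or.inl (Or.inl (Or.inl (Or.inl (Or.inl (Or.inl ⟨c, hc, hp⟩)))))))
      | exact Or.inl (Or.inl (Or.inl (Or.inl (Or.inl (Or.inl (Or.inl (Or.inr ⟨c, hc, hp⟩)))))))
      | exact Or.inl (Or.inl (Or.inl (Or.inl (Or.inl (Or.inl (Or.inr ⟨c, hc, hp⟩))))))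
      | exact Or.inl (Or.inl (Or.inl (Or.inl (Or.inl (Or.inr ⟨c, hc, hp⟩)))))
      | exact Or.inl (Or.inl (Or.inl (Or.inl (Or.inr ⟨c, hc, hp⟩))))
      | exact Or.inl (Or.inl (Or.inl (Or.inr ⟨c, hc, hp⟩)))
      | exact Or.inl (Or.inl (Or.inr ⟨c, hc, hp⟩))
      | exact Or.inl (Or.inr ⟨c, hc, hp⟩)
      | exact Or.inr ⟨c, hc, hp⟩

theorem pvStep_fst (cents : List (Int × Int)) (conf : List Int)
    (g : PySem.Dict (Int × Int) (List (Int × Int))) (lc : (Int × Int) × Int)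
    (hinv : pvInv cents g) :
    (pvBStep ((cents, conf), g) lc).1 = pvAStep (cents, conf) lc := by
  simp only [pvBStep]
  rw [pvFound_eq lc.1 cents g hinv]
  unfold pvAStep
  rw [pvfold_false (fun c : Int × Int => |lc.1.1 - c.1| + |lc.1.2 - c.2| < 75)]
  cases h : cents.any (fun c => decide (|lc.1.1 - c.1| + |lc.1.2 - c.2| < 75)) <;> simp_all

theorem pvStep_inv (cents : List (Int × Int)) (conf : List Int)
    (g : PySem.Dict (Int × Int) (List (Int × Int))) (lc : (Int × Int) × Int)
    (hinv : pvInv cents g) :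
    pvInv (pvBStep ((cents, conf), g) lc).1.1 (pvBStep ((cents, conf), g) lc).2 := by
  simp only [pvBStep]
  split
  · exact hinv
  · refine ⟨?_, ?_⟩
    · intro k p hp
      rw [PySem.Dict.getD_modify] at hp
      split at hp
      next hcond =>
        rcases List.mem_append.mp hp with h | h
        · rw [hcond]; exact hinv.1 _ p h
        · simp only [List.mem_singleton] at h
          subst h
          rw [hcond]; rfl
      next _ => exact hinv.1 _ p hp
    · intro p
      rw [PySem.Dict.getD_modify]
      by_cases hp : pvCell p = (PySem.Int.floordiv lc.1.1 75, PySem.Int.floordiv lc.1.2 75)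
      · rw [if_pos hp]
        simp only [List.mem_append, List.mem_singleton]
        constructor
        · rintro (h | h)
          · exact Or.inl (by rw [← hp] at *; exact (hinv.2 p).mp h)
          · exact Or.inr h
        · rintro (h | h)
          · exact Or.inl ((hinv.2 p).mpr (by rw [hp] at *; exact h))
          · exact Or.inr h
      · rw [if_neg hp]
        simp only [List.mem_append, List.mem_singleton]
        constructor
        · rintro (h | h)
          · exact (hinv.2 p).mp h
          · exact absurd (h ▸ rfl) hp
        · intro h
          exact Or.inl ((hinv.2 p).mpr h)

theorem pvMain (l : List ((Int × Int) × Int)) (cents : List (Int × Int)) (conf : List Int)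
    (g : PySem.Dict (Int × Int) (List (Int × Int))) (hinv : pvInv cents g) :
    (l.foldl pvBStep ((cents, conf), g)).1 = l.foldl pvAStep (cents, conf) := by
  induction l generalizing cents conf g with
  | nil => rfl
  | cons lc l ih =>
    rw [List.foldl_cons, List.foldl_cons]
    have hfst := pvStep_fst cents conf g lc hinv
    have hinv' := pvStep_inv cents conf g lc hinv
    have hrw : pvBStep ((cents, conf), g) lc
        = (((pvBStep ((cents, conf), g) lc).1.1, (pvBStep ((cents, conf), g) lc).1.2),
           (pvBStep ((cents, conf), g) lc).2) := rfl
    rw [hrw, ih _ _ _ hinv']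
    rw [← hfst]

theorem pvInit_inv (loc0 : Int × Int) :
    pvInv [loc0] (PySem.Dict.empty.insert (PySem.Int.floordiv loc0.1 75, PySem.Int.floordiv loc0.2 75) [loc0]) := by
  constructor
  · intro k p hp
    rw [PySem.Dict.getD_insert] at hp
    split at hp
    next hcond =>
      simp only [List.mem_singleton] at hp
      subst hp
      rw [hcond]; rfl
    next _ => simp [PySem.Dict.getD_empty] at hp
  · intro p
    rw [PySem.Dict.getD_insert]
    by_cases hp : pvCell p = (PySem.Int.floordiv loc0.1 75, PySem.Int.floordiv loc0.2 75)
    · rw [if_pos hp]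
    · rw [if_neg hp]
      simp only [PySem.Dict.getD_empty, List.mem_singleton, List.not_mem_nil, iff_false]
      intro h
      exact hp (h ▸ rfl)

-- ===== VERDICT (by name: the statement is the Claim_ definition above) =====
theorem remove_similar_locations_spec : Claim_equal_remove_similar_locations := by
  intro locations confidences _ hpre
  unfold Spec_remove_similar_locations
  match locations, confidences with
  | [], _ => exact absurd rfl hpre.1
  | _ :: _, [] => exact absurd rfl hpre.2
  | loc0 :: rest, conf0 :: crest =>
    show remove_similar_locations (loc0 :: rest) (conf0 :: crest)
        = remove_similar_locations_alt (loc0 :: rest) (conf0 :: crest)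
    unfold remove_similar_locations remove_similar_locations_alt
    exact (pvMain _ [loc0] [conf0] _ (pvInit_inv loc0)).symm
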